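-- pv_equiv track=rewrite | github.com/yisraelley/code-snippets-Meir-P.- | 15_04_24.py | is_tripled
-- ===== SOURCE A (Python) =====
-- def is_tripled(a):
--     if len(a) % 3 != 0:
--         return False
--     left = 0
--     right = len(a) // 3
--     while right < len(a) and a[left] == a[right]:
--         left += 1
--         right += 1
--     if right == len(a):
--         return True
--     return False
-- ===== SOURCE B (Python) =====
-- def is_tripled(a):
--     if len(a) % 3 != 0:
--         return False
--     t = len(a) // 3
--     return all(a[i] == a[t + i] and a[i] == a[2 * t + i] for i in range(t))
-- ===== Notes on version B (the rewrite author's own statement) =====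
-- stated objective: simpler
-- what changed: Replaces A's sliding two-pointer period sweep (comparing a[i] with a[i+t] across two thirds) with a direct element-wise check of the first third against each of the other two thirds over range(t).
import Mathlib
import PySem

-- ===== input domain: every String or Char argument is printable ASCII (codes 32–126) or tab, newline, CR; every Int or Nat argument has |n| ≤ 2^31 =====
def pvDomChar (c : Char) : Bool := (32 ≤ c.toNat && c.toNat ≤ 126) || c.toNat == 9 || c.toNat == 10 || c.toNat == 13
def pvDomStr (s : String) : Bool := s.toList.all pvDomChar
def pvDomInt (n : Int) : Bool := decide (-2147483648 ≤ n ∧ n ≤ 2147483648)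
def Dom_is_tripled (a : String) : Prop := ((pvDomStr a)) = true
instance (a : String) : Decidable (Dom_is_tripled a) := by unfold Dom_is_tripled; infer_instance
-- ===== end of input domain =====

-- B replaces A's sliding two-pointer period sweep with a direct per-index check of the
-- first third against the other two thirds (objective: simpler).

-- ===== PORT A =====
-- A's while loop: advance left/right while in range and characters match.
-- Indexing is exact: the loop only reads positions left < right < len, always in range,
-- so getD with a dummy default computes exactly Python's a[left], a[right].
def isTripledLoopA (cs : List Char) (left right : Nat) : Nat :=
  if _h : right < cs.length ∧ cs.getD left ' ' = cs.getD right ' ' then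
    isTripledLoopA cs (left + 1) (right + 1)
  else right
termination_by cs.length - right
decreasing_by omega

def is_tripled (a : String) : Bool :=
  let cs := a.toList
  if cs.length % 3 ≠ 0 then false
  else
    let right := isTripledLoopA cs 0 (cs.length / 3)
    if right = cs.length then true else false

-- ===== PORT B =====
def is_tripled_alt (a : String) : Bool :=
  let cs := a.toList
  if cs.length % 3 ≠ 0 then false
  else
    let t := cs.length / 3
    (List.range t).all (fun i =>
      (cs.getD i ' ' == cs.getD (t + i) ' ') && (cs.getD i ' ' == cs.getD (2 * t + i) ' '))

-- ===== PRECONDITION & SPEC =====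
def Spec_is_tripled (a : String) (out : Bool) : Prop := out = is_tripled_alt a
instance (a : String) (out : Bool) : Decidable (Spec_is_tripled a out) := by unfold Spec_is_tripled; infer_instance

-- ===== CLAIM (what is proved, stated in full; the proofs are below) =====
def Claim_equal_is_tripled : Prop := ∀ (a : String), Dom_is_tripled a → Spec_is_tripled a (is_tripled a)

-- ===== LEMMAS AND PROOFS =====

-- A's loop reaches the end of the string iff every remaining pair of positions matches.
theorem loopA_eq_len_iff (cs : List Char) :
    ∀ (k left right : Nat), right ≤ cs.length → cs.length - right = k →
      (isTripledLoopA cs left right = cs.length ↔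
        ∀ j, right + j < cs.length → cs.getD (left + j) ' ' = cs.getD (right + j) ' ') := by
  intro k
  induction k with
  | zero =>
    intro left right hle hk
    have hr : right = cs.length := by omega
    rw [isTripledLoopA]
    constructor
    · intro _ j hj; omega
    · intro _; simp [hr]
  | succ k ih =>
    intro left right hle hk
    have hr : right < cs.length := by omega
    rw [isTripledLoopA]
    by_cases hc : cs.getD left ' ' = cs.getD right ' '
    · rw [dif_pos ⟨hr, hc⟩]
      rw [ih (left + 1) (right + 1) (by omega) (by omega)]
      constructor
      · intro h j hj
        cases j with
        | zero => simpa using hc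
        | succ j =>
          have := h j (by omega)
          have e1 : left + 1 + j = left + (j + 1) := by omega
          have e2 : right + 1 + j = right + (j + 1) := by omega
          rwa [e1, e2] at this
      · intro h j hj
        have := h (j + 1) (by omega)
        have e1 : left + 1 + j = left + (j + 1) := by omega
        have e2 : right + 1 + j = right + (j + 1) := by omega
        rw [e1, e2]; exact this
    · rw [dif_neg (by intro h; exact hc h.2)]
      constructor
      · intro h; omega
      · intro h
        exact absurd (by simpa using h 0 (by omega)) hc

-- Bridge: periodicity over the whole string ↔ first third equals each other third.
theorem period_iff_thirds (cs : List Char) (t : Nat) (hn : cs.length = 3 * t) :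
    (∀ j, t + j < cs.length → cs.getD j ' ' = cs.getD (t + j) ' ') ↔
    (∀ i, i < t → cs.getD i ' ' = cs.getD (t + i) ' ' ∧ cs.getD i ' ' = cs.getD (2 * t + i) ' ') := by
  constructor
  · intro h i hi
    have h1 := h i (by omega)
    have h2 := h (t + i) (by omega)
    have e : t + (t + i) = 2 * t + i := by omega
    rw [e] at h2
    exact ⟨h1, h1.trans h2⟩
  · intro h j hj
    by_cases hjt : j < t
    · exact (h j hjt).1
    · have hi : j - t < t := by omega
      obtain ⟨h1, h2⟩ := h (j - t) hi
      have e1 : t + (j - t) = j := by omega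
      have e2 : 2 * t + (j - t) = t + j := by omega
      rw [e1] at h1
      rw [e2] at h2
      exact h1.symm.trans h2

-- ===== VERDICT (by name: the statement is the Claim_ definition above) =====
theorem is_tripled_spec : Claim_equal_is_tripled := by
  intro a _
  unfold Spec_is_tripled is_tripled is_tripled_alt
  set cs := a.toList with hcs
  by_cases h3 : cs.length % 3 = 0
  · simp only [h3, ne_eq, not_true_eq_false, if_false]
    set t := cs.length / 3 with ht
    have hn : cs.length = 3 * t := by omega
    have hloop := loopA_eq_len_iff cs (cs.length - t) 0 t (by omega) rfl
    simp only [zero_add] at hloop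
    have hiff := hloop.trans (period_iff_thirds cs t hn)
    by_cases hl : isTripledLoopA cs 0 t = cs.length
    · rw [if_pos hl]
      symm
      simp only [List.all_eq_true, List.mem_range, Bool.and_eq_true, beq_iff_eq]
      intro i hi; exact hiff.mp hl i hi
    · rw [if_neg hl]
      symm
      rw [Bool.eq_false_iff]
      simp only [ne_eq, List.all_eq_true, List.mem_range, Bool.and_eq_true, beq_iff_eq]
      intro hcon
      exact hl (hiff.mpr fun i hi => hcon i hi)
  · simp [h3]
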